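-- pv_equiv track=rewrite | github.com/Jayanthbabu456/Pre-Placement-Training-Assignments | Arrays-Assignment-6/Question-1.py | reconstruct_permutation
-- ===== SOURCE A (Python) =====
-- def reconstruct_permutation(s):
--     n = len(s)
--     perm = []
--     start = 0
--     end = 0
--
--     for i in range(n):
--         if s[i] == 'I':
--             perm.append(start)
--             start += 1
--         else:
--             perm.append(end)
--             end -= 1
--
--     perm.append(start)
--     return perm
-- ===== SOURCE B (Python) =====
-- def reconstruct_permutation(s):
--     n = len(s)
--     i_prefix = [0]
--     for i, c in enumerate(s):
--         i_prefix.append(i_prefix[i] + (1 if c == 'I' else 0))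
--     return [i_prefix[i] if s[i] == 'I' else i_prefix[i] - i for i in range(n)] + [i_prefix[n]]
-- ===== Notes on version B (the rewrite author's own statement) =====
-- stated objective: alternative
-- what changed: Replaces the two-accumulator incremental loop by a prefix-count table over s plus one position-indexed comprehension computing each element directly from the table.
import Mathlib
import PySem

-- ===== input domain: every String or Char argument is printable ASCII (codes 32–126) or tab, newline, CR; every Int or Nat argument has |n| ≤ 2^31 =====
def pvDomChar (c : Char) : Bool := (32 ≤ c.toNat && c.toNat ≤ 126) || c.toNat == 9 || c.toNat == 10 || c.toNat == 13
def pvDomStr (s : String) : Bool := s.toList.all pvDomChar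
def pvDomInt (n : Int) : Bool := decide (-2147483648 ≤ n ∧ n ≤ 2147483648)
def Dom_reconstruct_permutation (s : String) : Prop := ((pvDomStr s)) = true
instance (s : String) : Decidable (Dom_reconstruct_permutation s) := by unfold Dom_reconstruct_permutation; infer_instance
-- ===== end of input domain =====

-- B replaces A's two-accumulator incremental loop by a prefix-count table plus a
-- position-indexed comprehension (alternative decomposition, same O(n) cost).

-- ===== PORT A =====
-- the for-loop of A: state (perm, start, end); returns (perm, start) after the loop
def rpLoop : List Char → List Int → Int → Int → List Int × Int
  | [], perm, st, _ => (perm, st)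
  | c :: cs, perm, st, en =>
    if c = 'I' then rpLoop cs (perm ++ [st]) (st + 1) en
    else rpLoop cs (perm ++ [en]) st (en - 1)

def reconstruct_permutation (s : String) : List Int :=
  let r := rpLoop s.toList [] 0 0
  r.1 ++ [r.2]

-- ===== PORT B =====
-- the prefix-table loop of B: i_prefix.append(i_prefix[i] + (1 if c == 'I' else 0))
def rpBuild : List Char → Nat → List Int → List Int
  | [], _, ip => ip
  | c :: cs, i, ip => rpBuild cs (i + 1) (ip ++ [ip.getD i 0 + (if c = 'I' then 1 else 0)])

def reconstruct_permutation_alt (s : String) : List Int :=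
  let cs := s.toList
  let n := cs.length
  let ip := rpBuild cs 0 [0]
  ((List.range n).map (fun i =>
      if cs.getD i ' ' = 'I' then ip.getD i 0 else ip.getD i 0 - (i : Int)))
    ++ [ip.getD n 0]

-- ===== PRECONDITION & SPEC =====
def Spec_reconstruct_permutation (s : String) (out : List Int) : Prop := out = reconstruct_permutation_alt s
instance (s : String) (out : List Int) : Decidable (Spec_reconstruct_permutation s out) := by unfold Spec_reconstruct_permutation; infer_instance

-- ===== CLAIM (what is proved, stated in full; the proofs are below) =====
def Claim_equal_reconstruct_permutation : Prop := ∀ (s : String), Dom_reconstruct_permutation s → Spec_reconstruct_permutation s (reconstruct_permutation s)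

-- ===== LEMMAS AND PROOFS =====

-- number of 'I' characters, as an Int
def cI (cs : List Char) : Int := (cs.count 'I' : Int)

theorem cI_nil : cI [] = 0 := rfl

theorem cI_cons (c : Char) (cs : List Char) :
    cI (c :: cs) = (if c = 'I' then 1 else 0) + cI cs := by
  simp [cI, List.count_cons]
  split_ifs <;> ring

-- characterisation of A's loop
theorem rpLoop_spec (cs : List Char) : ∀ (perm : List Int) (a b : Int),
    rpLoop cs perm a b =
      (perm ++ (List.range cs.length).map (fun i =>
          if cs.getD i ' ' = 'I' then a + cI (cs.take i) else b - (i : Int) + cI (cs.take i)),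
       a + cI cs) := by
  induction cs with
  | nil => intro perm a b; simp [rpLoop, cI_nil]
  | cons c cs ih =>
    intro perm a b
    rw [List.length_cons, List.range_succ_eq_map]
    by_cases hc : c = 'I'
    · simp only [rpLoop, ih, cI_cons, if_pos hc, List.map_cons]
      refine Prod.ext ?_ ?_
      · simp only [List.append_assoc, List.singleton_append]
        congr 1
        congr 1
        · simp [hc, cI_nil]
        · rw [List.map_map]
          apply List.map_congr_left
          intro i _
          simp only [Function.comp, List.getD_cons_succ, List.take_succ_cons,
            cI_cons, if_pos hc]
          split_ifs <;> push_cast <;> ring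
      · ring
    · simp only [rpLoop, ih, cI_cons, if_neg hc, List.map_cons]
      refine Prod.ext ?_ ?_
      · simp only [List.append_assoc, List.singleton_append]
        congr 1
        congr 1
        · simp [hc, cI_nil]
        · rw [List.map_map]
          apply List.map_congr_left
          intro i _
          simp only [Function.comp, List.getD_cons_succ, List.take_succ_cons,
            cI_cons, if_neg hc]
          split_ifs <;> push_cast <;> ring
      · ring

-- pure prefix-suffix shape of B's table
def rpPf : List Char → Int → List Int
  | [], _ => []
  | c :: cs, x => (x + (if c = 'I' then 1 else 0)) :: rpPf cs (x + (if c = 'I' then 1 else 0))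

theorem rpBuild_spec (cs : List Char) : ∀ (j : Nat) (ip : List Int),
    ip.length = j + 1 → rpBuild cs j ip = ip ++ rpPf cs (ip.getD j 0) := by
  induction cs with
  | nil => intro j ip _; simp [rpBuild, rpPf]
  | cons c cs ih =>
    intro j ip hlen
    rw [rpBuild, ih (j + 1) _ (by simp [hlen])]
    have hx : (ip ++ [ip.getD j 0 + (if c = 'I' then 1 else 0)]).getD (j + 1) 0
        = ip.getD j 0 + (if c = 'I' then 1 else 0) := by
      simp [List.getD, hlen]
    rw [hx]
    simp [rpPf]

theorem rpPf_getD (cs : List Char) : ∀ (x : Int) (i : Nat), i < cs.length →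
    (rpPf cs x).getD i 0 = x + cI (cs.take (i + 1)) := by
  induction cs with
  | nil => intro x i h; simp at h
  | cons c cs ih =>
    intro x i h
    cases i with
    | zero => simp [rpPf, cI_cons, cI_nil]
    | succ k =>
      rw [rpPf, List.getD_cons_succ, ih _ k (by simpa using h)]
      rw [List.take_succ_cons, cI_cons]
      ring

theorem ip_getD (cs : List Char) (i : Nat) (h : i ≤ cs.length) :
    (rpBuild cs 0 [0]).getD i 0 = cI (cs.take i) := by
  rw [rpBuild_spec cs 0 [0] rfl]
  cases i with
  | zero => simp [cI_nil]
  | succ k =>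
    have hk : k < cs.length := by omega
    have h2 := rpPf_getD cs 0 k hk
    simp only [List.singleton_append, List.getD_cons_zero, List.getD_cons_succ] at *
    rw [h2]; ring

-- ===== VERDICT (by name: the statement is the Claim_ definition above) =====
theorem reconstruct_permutation_spec : Claim_equal_reconstruct_permutation := by
  intro s _
  unfold Spec_reconstruct_permutation reconstruct_permutation reconstruct_permutation_alt
  rw [rpLoop_spec]
  simp only [List.nil_append, zero_add]
  congr 1
  · apply List.map_congr_left
    intro i hi
    rw [List.mem_range] at hi
    rw [ip_getD s.toList i (le_of_lt hi)]
    split_ifs <;> ring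
  · rw [ip_getD s.toList s.toList.length le_rfl]
    rw [show s.toList.length = s.length from by simp] 
    rw [show s.length = s.toList.length from by simp, List.take_length]
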